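-- pv_equiv track=rewrite | github.com/alyalsayed/IEEE-ZSB-Technical-Rookies-23 | Task-3/problem 5.py | solve
-- ===== SOURCE A (Python) =====
-- def solve(n, arr):
--     s = [0] * n
--     for i in range(n):
--         if arr[i] == 1:
--             s[i] = 0
--         else:
--             if i == 0:
--                 s[i] = 10**9
--             else:
--                 s[i] = s[i - 1] + 1
--     return s
-- ===== SOURCE B (Python) =====
-- def solve(n, arr):
--     ones = [i for i in range(n) if arr[i] == 1]
--     first = ones[0] if ones else n
--     out = [10**9 + i for i in range(first)]
--     for j, e in zip(ones, ones[1:] + [n]):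
--         out.extend(range(e - j))
--     return out
-- ===== Notes on version B (the rewrite author's own statement) =====
-- stated objective: alternative
-- what changed: B is staged and segment-based: it first collects the positions of all 1s, then builds the answer as a prefix of sentinel values plus one concatenated range(0, gap) block per 1, instead of A's single elementwise pass filling a preallocated array via the recurrence s[i] = s[i-1] + 1.
import Mathlib
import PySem

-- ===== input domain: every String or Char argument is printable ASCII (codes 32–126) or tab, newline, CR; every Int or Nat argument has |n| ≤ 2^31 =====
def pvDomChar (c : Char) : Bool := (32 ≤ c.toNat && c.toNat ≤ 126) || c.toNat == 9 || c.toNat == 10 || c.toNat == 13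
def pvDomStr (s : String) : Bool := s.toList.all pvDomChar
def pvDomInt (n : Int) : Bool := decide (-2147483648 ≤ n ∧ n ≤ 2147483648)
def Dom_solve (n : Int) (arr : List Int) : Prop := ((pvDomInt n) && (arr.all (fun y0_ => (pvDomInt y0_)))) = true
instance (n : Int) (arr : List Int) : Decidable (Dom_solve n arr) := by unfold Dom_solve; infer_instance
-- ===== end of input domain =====

-- B is segment-based: it first collects the positions of the 1s, then emits a sentinel
-- prefix and one range(0, gap) block per 1, instead of A's elementwise recurrence pass.


-- ===== PORT A =====
def solve (n : Int) (arr : List Int) : List Int :=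
  (PySem.List.pyRange 0 n 1).foldl
    (fun s i =>
      if PySem.List.pyGetD arr i 0 = 1 then
        PySem.List.pySetD s i 0
      else if i = 0 then
        PySem.List.pySetD s i (10 ^ 9)
      else
        PySem.List.pySetD s i (PySem.List.pyGetD s (i - 1) 0 + 1))
    (List.replicate n.toNat 0)

-- ===== PORT B =====
def solve_alt (n : Int) (arr : List Int) : List Int :=
  let ones := (PySem.List.pyRange 0 n 1).filter (fun i => PySem.List.pyGetD arr i 0 == 1)
  let first := match ones with | [] => n | j :: _ => j
  let out := (PySem.List.pyRange 0 first 1).map (fun i => 10 ^ 9 + i)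
  (List.zip ones (PySem.List.slice ones (some 1) none ++ [n])).foldl
    (fun out je => out ++ PySem.List.pyRange 0 (je.2 - je.1) 1) out

-- ===== PRECONDITION & SPEC =====
-- Python A raises IndexError when n > len(arr) (it reads arr[i] for every i < n); Pre_ excludes exactly that.
def Pre_solve (n : Int) (arr : List Int) : Prop := n ≤ (arr.length : Int)
instance (n : Int) (arr : List Int) : Decidable (Pre_solve n arr) := by unfold Pre_solve; infer_instance
def pvWitness_solve : Int × List Int := (4, [1, 0, 0, 1])
def Spec_solve (n : Int) (arr : List Int) (out : List Int) : Prop := out = solve_alt n arr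
instance (n : Int) (arr : List Int) (out : List Int) : Decidable (Spec_solve n arr out) := by unfold Spec_solve; infer_instance

-- ===== CLAIM (what is proved, stated in full; the proofs are below) =====
def Claim_equal_solve : Prop := ∀ (n : Int) (arr : List Int), Dom_solve n arr → Pre_solve n arr → Spec_solve n arr (solve n arr)

-- ===== LEMMAS AND PROOFS =====

-- the Bool test 'arr[i] == 1' shared by both analyses
def pvP (arr : List Int) (i : Int) : Bool := PySem.List.pyGetD arr i 0 == 1

-- index of the last 1 strictly below m (sentinel -10^9 if none)
def pvLast (arr : List Int) : Nat → Int
  | 0 => -10 ^ 9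
  | m + 1 => if pvP arr m then (m : Int) else pvLast arr m

-- the intended value at index m
def pvG (arr : List Int) (m : Nat) : Int :=
  if pvP arr m then 0 else (m : Int) - pvLast arr m

def pvOut (arr : List Int) (m : Nat) : List Int := (List.range m).map (pvG arr)

def pvStepA (arr : List Int) (s : List Int) (i : Int) : List Int :=
  if PySem.List.pyGetD arr i 0 = 1 then
    PySem.List.pySetD s i 0
  else if i = 0 then
    PySem.List.pySetD s i (10 ^ 9)
  else
    PySem.List.pySetD s i (PySem.List.pyGetD s (i - 1) 0 + 1)

def pvAfold (arr : List Int) (N m : Nat) : List Int :=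
  (PySem.List.pyRange 0 (m : Int) 1).foldl (pvStepA arr) (List.replicate N 0)

theorem pvAfold_succ (arr : List Int) (N m : Nat) :
    pvAfold arr N (m + 1) = pvStepA arr (pvAfold arr N m) m := by
  unfold pvAfold
  rw [show ((m + 1 : Nat) : Int) = (m : Int) + 1 by push_cast; ring,
    PySem.List.pyRange_one_succ_right (by positivity), List.foldl_append]
  rfl

theorem pvP_iff (arr : List Int) (i : Int) :
    pvP arr i = true ↔ PySem.List.pyGetD arr i 0 = 1 := by
  simp [pvP]

theorem pvG_succ (arr : List Int) (m : Nat) (hm : 0 < m) (h : pvP arr m = false) :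
    pvG arr m = pvG arr (m - 1) + 1 := by
  obtain ⟨k, rfl⟩ : ∃ k, m = k + 1 := ⟨m - 1, by omega⟩
  simp only [Nat.add_sub_cancel]
  rw [pvG, pvG, if_neg (by simpa using h),
    show pvLast arr (k + 1) = if pvP arr (k : Int) then (k : Int) else pvLast arr k from rfl]
  by_cases hk : pvP arr (k : Int) = true
  · rw [if_pos hk, if_pos hk]; push_cast; ring
  · rw [if_neg hk, if_neg (by simpa using hk)]; push_cast; ring

theorem pvG_zero (arr : List Int) (h : pvP arr 0 = false) :
    pvG arr 0 = 10 ^ 9 := by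
  rw [pvG, if_neg (by simp [h]), show pvLast arr 0 = -10 ^ 9 from rfl]
  norm_num

-- A's fold computes pvOut, padded with the untouched zeros
theorem pvInvariant (arr : List Int) (N : Nat) (_hN : N ≤ arr.length) :
    ∀ m : Nat, m ≤ N → pvAfold arr N m = pvOut arr m ++ List.replicate (N - m) 0 := by
  intro m
  induction m with
  | zero => intro _; simp [pvAfold, pvOut]
  | succ m ih =>
    intro hm
    rw [pvAfold_succ, ih (by omega)]
    have hlen : (pvOut arr m).length = m := by simp [pvOut]
    have hrep : List.replicate (N - m) (0 : Int) =
        0 :: List.replicate (N - (m + 1)) 0 := by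
      rw [show N - m = (N - (m + 1)) + 1 by omega, List.replicate_succ]
    have hsetq : ∀ (q : List Int) (v : Int), q.length = m →
        PySem.List.pySetD (q ++ List.replicate (N - m) 0) (m : Int) v =
          (q ++ [v]) ++ List.replicate (N - (m + 1)) 0 := by
      intro q v hql
      rw [PySem.List.pySetD_natCast, hrep, show m = q.length by omega,
        List.set_append]
      simp
    have hset : ∀ v : Int,
        PySem.List.pySetD (pvOut arr m ++ List.replicate (N - m) 0) (m : Int) v =
          (pvOut arr m ++ [v]) ++ List.replicate (N - (m + 1)) 0 :=
      fun v => hsetq (pvOut arr m) v hlen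
    have hout : pvOut arr (m + 1) = pvOut arr m ++ [pvG arr m] := by
      simp [pvOut, List.range_succ]
    unfold pvStepA
    by_cases h1 : PySem.List.pyGetD arr (m : Int) 0 = 1
    · rw [if_pos h1, hset 0, hout, pvG, if_pos ((pvP_iff arr m).2 h1)]
    · have hp : pvP arr m = false := by
        rw [← Bool.not_eq_true, pvP_iff]; exact h1
      rw [if_neg h1]
      by_cases h0 : (m : Int) = 0
      · have hm0 : m = 0 := by omega
        subst hm0
        rw [if_pos h0, hset (10 ^ 9), hout, pvG_zero arr (by simpa using hp)]
      · have hm0 : 0 < m := by omega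
        have hread : PySem.List.pyGetD
            (pvOut arr m ++ List.replicate (N - m) 0) ((m : Int) - 1) 0 =
            pvG arr (m - 1) := by
          rw [show (m : Int) - 1 = ((m - 1 : Nat) : Int) by omega,
            PySem.List.pyGetD_natCast]
          have hidx : m - 1 < (pvOut arr m).length := by omega
          rw [List.getD_eq_getElem?_getD, List.getElem?_append_left hidx]
          simp [pvOut, List.getElem_range, hm0]
        rw [if_neg h0, hread, hset (pvG arr (m - 1) + 1), hout, pvG_succ arr m hm0 hp]
  -- done

-- pvLast is constant across a 1-free stretch
theorem pvLast_const (arr : List Int) (a : Nat) :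
    ∀ m : Nat, a ≤ m → (∀ t : Nat, a ≤ t → t < m → pvP arr t = false) →
      pvLast arr m = pvLast arr a := by
  intro m
  induction m with
  | zero => intro h _; have : a = 0 := by omega
            rw [this]
  | succ m ih =>
    intro ha hfree
    by_cases hm : a = m + 1
    · rw [hm]
    · have h' : a ≤ m := by omega
      rw [show pvLast arr (m + 1) = if pvP arr (m : Int) then (m : Int) else pvLast arr m from rfl,
        if_neg (by simp [hfree m h' (by omega)]), ih h'
        (fun t h1 h2 => hfree t h1 (by omega))]

-- peeling the first 1 off the filter of a range
theorem pvFsplit (arr : List Int) (n : Int) :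
    ∀ (k : Nat) (a : Int), (n - a).toNat = k →
      ∀ j os, (PySem.List.pyRange a n 1).filter (pvP arr) = j :: os →
        a ≤ j ∧ j < n ∧ pvP arr j = true ∧
        (∀ t, a ≤ t → t < j → pvP arr t = false) ∧
        os = (PySem.List.pyRange (j + 1) n 1).filter (pvP arr) := by
  intro k
  induction k with
  | zero =>
    intro a hk j os h
    rw [PySem.List.pyRange_one_eq_nil (by omega)] at h
    exact absurd h (by simp)
  | succ k ih =>
    intro a hk j os h
    have ha : a < n := by omega
    rw [PySem.List.pyRange_one_cons ha, List.filter_cons] at h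
    by_cases hp : pvP arr a = true
    · rw [if_pos hp] at h
      obtain ⟨rfl, rfl⟩ := List.cons_eq_cons.mp h
      refine ⟨le_refl _, ha, hp, ?_, rfl⟩
      intro t h1 h2
      exact absurd h2 (by omega)
    · rw [if_neg hp] at h
      obtain ⟨h1, h2, h3, h4, h5⟩ := ih (a + 1) (by omega) j os h
      refine ⟨by omega, h2, h3, fun t ht1 ht2 => ?_, h5⟩
      by_cases hta : t = a
      · simpa [hta] using hp
      · exact h4 t (by omega) ht2
-- a single segment [j, e) with a 1 at j and nothing after maps to range(0, e-j)
theorem pvSegment (arr : List Int) (j e : Int) (hj : 0 ≤ j) (_hje : j ≤ e)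
    (hpj : pvP arr j = true)
    (hfree : ∀ t, j + 1 ≤ t → t < e → pvP arr t = false) :
    (PySem.List.pyRange j e 1).map (fun i => pvG arr i.toNat) =
      PySem.List.pyRange 0 (e - j) 1 := by
  rw [PySem.List.pyRange_one j e, PySem.List.pyRange_one 0 (e - j), List.map_map]
  simp only [show e - j - 0 = e - j from by ring]
  refine List.map_congr_left (fun k hk => ?_)
  rw [List.mem_range] at hk
  have hklt : (k : Int) < e - j := by omega
  have htn : (j + (k : Int)).toNat = j.toNat + k := by omega
  have hcast : ((j.toNat + k : Nat) : Int) = j + k := by omega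
  by_cases hk0 : k = 0
  · subst hk0
    simp only [Function.comp_apply, htn]
    rw [pvG, if_pos (by rwa [hcast, show j + (0:Nat) = j by push_cast; ring])]
    norm_num
  · have hlast : pvLast arr (j.toNat + k) = j := by
      have hbase : pvLast arr (j.toNat + 1) = j := by
        rw [pvLast, if_pos (by rwa [Int.toNat_of_nonneg hj])]
        omega
      rw [pvLast_const arr (j.toNat + 1) (j.toNat + k) (by omega)
        (fun t h1 h2 => hfree t (by omega) (by omega)), hbase]
    simp only [Function.comp_apply, htn]
    rw [pvG, if_neg (by rw [hcast]; simp [hfree (j + k) (by omega) (by omega)]),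
      hlast, hcast]
    ring

-- the chunk part: from the first 1 on, pvG is the concatenation of the zipped gaps
theorem pvChunk (arr : List Int) (n : Int) :
    ∀ (os : List Int) (j : Int), 0 ≤ j → j < n → pvP arr j = true →
      os = (PySem.List.pyRange (j + 1) n 1).filter (pvP arr) →
      (PySem.List.pyRange j n 1).map (fun i => pvG arr i.toNat) =
        (List.zip (j :: os) (os ++ [n])).flatMap
          (fun q => PySem.List.pyRange 0 (q.2 - q.1) 1) := by
  intro os
  induction os with
  | nil =>
    intro j hj hjn hpj hos
    have hfree : ∀ t, j + 1 ≤ t → t < n → pvP arr t = false := by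
      intro t h1 h2
      have := List.filter_eq_nil_iff.1 hos.symm t
        (by rw [PySem.List.mem_pyRange_one]; omega)
      simpa using this
    simpa using pvSegment arr j n hj (by omega) hpj hfree
  | cons j' os' ih =>
    intro j hj hjn hpj hos
    obtain ⟨h1, h2, h3, h4, h5⟩ :=
      pvFsplit arr n ((n - (j + 1)).toNat) (j + 1) rfl j' os' hos.symm
    have hsplit : PySem.List.pyRange j n 1 =
        PySem.List.pyRange j j' 1 ++ PySem.List.pyRange j' n 1 :=
      PySem.List.pyRange_one_append j j' n (by omega) (by omega)
    rw [hsplit, List.map_append,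
      pvSegment arr j j' hj (by omega) hpj (fun t ht1 ht2 => h4 t ht1 ht2),
      ih j' (by omega) h2 h3 h5]
    simp [List.zip]

-- the prefix before the first 1 maps to the sentinel values
theorem pvPrefix (arr : List Int) (f : Int)
    (hfree : ∀ t, 0 ≤ t → t < f → pvP arr t = false) :
    (PySem.List.pyRange 0 f 1).map (fun i => pvG arr i.toNat) =
      (PySem.List.pyRange 0 f 1).map (fun i => 10 ^ 9 + i) := by
  refine List.map_congr_left (fun i hi => ?_)
  rw [PySem.List.mem_pyRange_one] at hi
  have hlast : pvLast arr i.toNat = -10 ^ 9 := by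
    rw [pvLast_const arr 0 i.toNat (by omega)
      (fun t h1 h2 => hfree t (by omega) (by omega))]
    rfl
  rw [pvG, if_neg (by simp [hfree i hi.1 hi.2, Int.toNat_of_nonneg hi.1]), hlast,
    Int.toNat_of_nonneg hi.1]
  ring

theorem pvOut_eq_map (arr : List Int) (n : Int) (_hn : 0 ≤ n) :
    pvOut arr n.toNat = (PySem.List.pyRange 0 n 1).map (fun i => pvG arr i.toNat) := by
  rw [pvOut, PySem.List.pyRange_one, List.map_map]
  simp only [Int.sub_zero]
  exact List.map_congr_left (fun k hk => by simp)

theorem pvB_eq (arr : List Int) (n : Int) (_hn : 0 ≤ n) :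
    solve_alt n arr = pvOut arr n.toNat := by
  rw [pvOut_eq_map arr n _hn]
  unfold solve_alt
  simp only [PySem.List.slice_from_one]
  rcases hos : (PySem.List.pyRange 0 n 1).filter
      (fun i => PySem.List.pyGetD arr i 0 == 1) with _ | ⟨j, os⟩
  · have hfree : ∀ t, 0 ≤ t → t < n → pvP arr t = false := by
      intro t h1 h2
      have := List.filter_eq_nil_iff.1 hos t
        (by rw [PySem.List.mem_pyRange_one]; omega)
      simpa [pvP] using this
    simp [pvPrefix arr n hfree]
  · obtain ⟨h1, h2, h3, h4, h5⟩ :=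
      pvFsplit arr n (n - 0).toNat 0 rfl j os (by simpa [pvP] using hos)
    simp only [List.tail_cons]
    rw [PySem.List.foldl_append_eq_flatMap,
      show PySem.List.pyRange 0 n 1 =
        PySem.List.pyRange 0 j 1 ++ PySem.List.pyRange j n 1 from
        PySem.List.pyRange_one_append 0 j n h1 (by omega),
      List.map_append, pvPrefix arr j h4,
      pvChunk arr n os j h1 h2 h3 h5]

theorem pv_main (n : Int) (arr : List Int) (hpre : n ≤ (arr.length : Int)) :
    solve n arr = solve_alt n arr := by
  by_cases hn : 0 ≤ n
  · have hEq : n = ((n.toNat : Nat) : Int) := by omega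
    have hN : n.toNat ≤ arr.length := by omega
    have hA : solve n arr = pvAfold arr n.toNat n.toNat := by
      rw [hEq]; rfl
    rw [hA, pvInvariant arr n.toNat hN n.toNat le_rfl, pvB_eq arr n hn]
    simp
  · have h : PySem.List.pyRange 0 n 1 = [] :=
      PySem.List.pyRange_one_eq_nil (by omega)
    have hnt : n.toNat = 0 := by omega
    simp [solve, solve_alt, h, hnt]

-- ===== VERDICT (by name: the statement is the Claim_ definition above) =====
theorem solve_spec : Claim_equal_solve := by
  intro n arr _ hpre
  exact pv_main n arr hpre
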